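-- pv_equiv track=rewrite | github.com/dumpstate/advent-of-code | 2020/day20.py | count_intersecting_edges
-- ===== SOURCE A (Python) =====
-- def count_intersecting_edges(tile_id, tile_edges, edges):
--     intersecting_edges = set()
--
--     for other_tile_id, other_edges in edges.items():
--         if other_tile_id == tile_id:
--             continue
--
--         for intersecting_edge in other_edges.intersection(tile_edges):
--             intersecting_edges.add(intersecting_edge)
--
--     return len(intersecting_edges)
-- ===== SOURCE B (Python) =====
-- def count_intersecting_edges(tile_id, tile_edges, edges):
--     # Outer loop over the tile's OWN distinct edges; test each against the dict with any().
--     count = 0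
--     for edge in set(tile_edges):
--         if any(edge in other_edges
--                for other_tile_id, other_edges in edges.items()
--                if other_tile_id != tile_id):
--             count += 1
--     return count
-- ===== Notes on version B (the rewrite author's own statement) =====
-- stated objective: alternative
-- what changed: B inverts the iteration: instead of A's outer pass over the other tiles accumulating set intersections into a result set, B loops over the tile's own distinct edges and for each one probes the dict with any(edge in other_edges ...), maintaining a plain integer counter and no intermediate sets.
import Mathlib
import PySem

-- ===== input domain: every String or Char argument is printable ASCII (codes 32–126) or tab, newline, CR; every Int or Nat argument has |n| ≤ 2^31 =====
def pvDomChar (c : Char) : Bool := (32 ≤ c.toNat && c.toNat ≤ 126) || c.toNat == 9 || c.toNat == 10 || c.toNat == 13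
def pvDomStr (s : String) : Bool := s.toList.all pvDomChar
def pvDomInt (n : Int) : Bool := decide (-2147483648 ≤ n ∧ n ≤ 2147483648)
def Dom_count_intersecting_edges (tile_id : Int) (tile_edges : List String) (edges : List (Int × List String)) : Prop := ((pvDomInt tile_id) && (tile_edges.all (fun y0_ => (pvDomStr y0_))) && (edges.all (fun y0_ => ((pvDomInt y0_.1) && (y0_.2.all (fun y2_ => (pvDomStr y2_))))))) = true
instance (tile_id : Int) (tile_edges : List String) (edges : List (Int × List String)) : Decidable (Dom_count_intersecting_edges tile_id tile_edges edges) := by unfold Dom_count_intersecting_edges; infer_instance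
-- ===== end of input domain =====

-- B inverts the iteration: it loops over the tile's own distinct edges and probes the dict with
-- any(...) per edge, keeping an integer counter — no intersections, no result set.

-- ===== PORT A =====
-- intersecting_edges = set(); for other_tile_id, other_edges in edges.items():
--   if other_tile_id == tile_id: continue
--   for e in other_edges.intersection(tile_edges): intersecting_edges.add(e)
-- return len(intersecting_edges)
def count_intersecting_edges (tile_id : Int) (tile_edges : List String) (edges : List (Int × List String)) : Int :=
  let intersecting_edges : PySem.Set String :=
    edges.foldl
      (fun acc p =>
        if p.1 == tile_id then acc
        else ((PySem.Set.ofList p.2).inter tile_edges).foldl (fun s e => s.add e) acc)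
      PySem.Set.empty
  PySem.Set.len intersecting_edges

-- ===== PORT B =====
-- count = 0
-- for edge in set(tile_edges):
--   if any(edge in other_edges for other_tile_id, other_edges in edges.items() if other_tile_id != tile_id):
--     count += 1
-- return count
def count_intersecting_edges_alt (tile_id : Int) (tile_edges : List String) (edges : List (Int × List String)) : Int :=
  (PySem.Set.ofList tile_edges).foldl
    (fun count edge =>
      if edges.any (fun p => p.1 != tile_id && p.2.contains edge) then count + 1 else count)
    0

-- ===== PRECONDITION & SPEC =====
def Spec_count_intersecting_edges (tile_id : Int) (tile_edges : List String) (edges : List (Int × List String)) (out : Int) : Prop := out = count_intersecting_edges_alt tile_id tile_edges edges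
instance (tile_id : Int) (tile_edges : List String) (edges : List (Int × List String)) (out : Int) : Decidable (Spec_count_intersecting_edges tile_id tile_edges edges out) := by unfold Spec_count_intersecting_edges; infer_instance

-- ===== CLAIM (what is proved, stated in full; the proofs are below) =====
def Claim_equal_count_intersecting_edges : Prop := ∀ (tile_id : Int) (tile_edges : List String) (edges : List (Int × List String)), Dom_count_intersecting_edges tile_id tile_edges edges → Spec_count_intersecting_edges tile_id tile_edges edges (count_intersecting_edges tile_id tile_edges edges)

-- ===== LEMMAS AND PROOFS =====

-- The predicate both programs count: edge e appears in some OTHER tile (B's any(...) body).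
def pvShared (tile_id : Int) (edges : List (Int × List String)) (e : String) : Bool :=
  edges.any (fun p => p.1 != tile_id && p.2.contains e)

-- Membership in A's accumulator after the outer fold.
theorem pvA_mem (tile_id : Int) (tile_edges : List String) (edges : List (Int × List String))
    (acc : PySem.Set String) (y : String) :
    y ∈ edges.foldl
      (fun acc p =>
        if p.1 == tile_id then acc
        else ((PySem.Set.ofList p.2).inter tile_edges).foldl (fun s e => s.add e) acc)
      acc
    ↔ y ∈ acc ∨ (y ∈ tile_edges ∧ pvShared tile_id edges y = true) := by
  induction edges generalizing acc with
  | nil => simp [pvShared]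
  | cons p rest ih =>
    simp only [List.foldl_cons]
    by_cases h : (p.1 == tile_id) = true
    · have hp : p.1 = tile_id := by simpa using h
      rw [if_pos h, ih]
      have hsh : pvShared tile_id (p :: rest) y = pvShared tile_id rest y := by
        simp [pvShared, hp]
      rw [hsh]
    · have hp : ¬ p.1 = tile_id := by simpa using h
      rw [if_neg h, ih]
      have hm : y ∈ ((PySem.Set.ofList p.2).inter tile_edges).foldl (fun s e => s.add e) acc
          ↔ y ∈ acc ∨ (y ∈ p.2 ∧ y ∈ tile_edges) := by
        rw [PySem.Set.mem_foldl_add _ (fun e => e)]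
        simp [PySem.Set.mem_inter, PySem.Set.mem_ofList]
      rw [hm]
      have hcons : pvShared tile_id (p :: rest) y
          = ((p.1 != tile_id && p.2.contains y) || pvShared tile_id rest y) := by
        simp [pvShared]
      rw [hcons]
      simp only [Bool.or_eq_true, Bool.and_eq_true, bne_iff_ne, List.contains_iff_mem]
      tauto

-- A's accumulator stays duplicate-free.
theorem pvA_nodup (tile_id : Int) (tile_edges : List String) (edges : List (Int × List String))
    (acc : PySem.Set String) (hacc : acc.Nodup) :
    (edges.foldl
      (fun acc p =>
        if p.1 == tile_id then acc
        else ((PySem.Set.ofList p.2).inter tile_edges).foldl (fun s e => s.add e) acc)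
      acc).Nodup := by
  induction edges generalizing acc with
  | nil => simpa using hacc
  | cons p rest ih =>
    simp only [List.foldl_cons]
    by_cases h : (p.1 == tile_id) = true
    · rw [if_pos h]; exact ih acc hacc
    · rw [if_neg h]
      apply ih
      have : ((PySem.Set.ofList p.2).inter tile_edges).foldl (fun s e => s.add e) acc
          = PySem.Set.update acc ((PySem.Set.ofList p.2).inter tile_edges) := rfl
      rw [this]
      exact PySem.Set.nodup_update _ _ hacc

theorem count_intersecting_edges_eq (tile_id : Int) (tile_edges : List String)
    (edges : List (Int × List String)) :
    count_intersecting_edges tile_id tile_edges edges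
      = count_intersecting_edges_alt tile_id tile_edges edges := by
  unfold count_intersecting_edges count_intersecting_edges_alt
  have hB : (PySem.Set.ofList tile_edges).foldl
      (fun count edge =>
        if edges.any (fun p => p.1 != tile_id && p.2.contains edge) then count + 1 else count) 0
      = ((PySem.Set.ofList tile_edges).countP (pvShared tile_id edges) : Int) := by
    unfold pvShared
    rw [PySem.List.foldl_count_if
      (fun edge => edges.any (fun p => p.1 != tile_id && p.2.contains edge))
      (PySem.Set.ofList tile_edges) 0]
    simp
  rw [hB]
  set S := List.foldl
      (fun acc p =>
        if p.1 == tile_id then acc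
        else ((PySem.Set.ofList p.2).inter tile_edges).foldl (fun s e => s.add e) acc)
      PySem.Set.empty edges with hS
  have hlen : PySem.Set.len S = (S.length : Int) := by
    simp [PySem.Set.len]
  have hmem : ∀ y, y ∈ S ↔ y ∈ (PySem.Set.ofList tile_edges).filter (pvShared tile_id edges) := by
    intro y
    rw [hS, pvA_mem]
    simp [PySem.Set.mem_ofList, List.mem_filter, PySem.Set.empty]
  have hperm : S.Perm ((PySem.Set.ofList tile_edges).filter (pvShared tile_id edges)) := by
    refine (List.perm_ext_iff_of_nodup ?_ ?_).mpr hmem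
    · exact pvA_nodup tile_id tile_edges edges _ (by simp [PySem.Set.empty])
    · exact (PySem.Set.nodup_ofList tile_edges).filter _
  rw [hlen, hperm.length_eq, ← List.countP_eq_length_filter]

-- ===== VERDICT (by name: the statement is the Claim_ definition above) =====
theorem count_intersecting_edges_spec : Claim_equal_count_intersecting_edges := by
  intro tile_id tile_edges edges _
  unfold Spec_count_intersecting_edges
  exact count_intersecting_edges_eq tile_id tile_edges edges
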